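-- pv_equiv track=rewrite | github.com/15lollo15/MovieSearchEngine | searcher.py | cutAtRank
-- ===== SOURCE A (Python) =====
-- def cutAtRank(map, rank):
--     '''Remove all result with rank less than rank given in input'''
--     if rank == None:
--         rank = len(map.keys())
--     count = 0
--     keys = list(map.keys())
--     for k in keys:
--         if count >= rank or map[k] == 0:
--             map.pop(k)
--         count += 1
--     return map
-- ===== SOURCE B (Python) =====
-- def cutAtRank(map, rank):
--     '''Remove all result with rank less than rank given in input'''
--     if rank is None:
--         rank = len(map)
--     return {k: v for i, (k, v) in enumerate(map.items()) if i < rank and v != 0}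
-- ===== Notes on version B (the rewrite author's own statement) =====
-- stated objective: idiomatic
-- what changed: A's counter-and-branch loop that pops entries out of the dict in place is replaced by a single filtered dict comprehension over enumerate(map.items()) that builds the result directly (return value identical; A mutates its argument, B does not).
import Mathlib
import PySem

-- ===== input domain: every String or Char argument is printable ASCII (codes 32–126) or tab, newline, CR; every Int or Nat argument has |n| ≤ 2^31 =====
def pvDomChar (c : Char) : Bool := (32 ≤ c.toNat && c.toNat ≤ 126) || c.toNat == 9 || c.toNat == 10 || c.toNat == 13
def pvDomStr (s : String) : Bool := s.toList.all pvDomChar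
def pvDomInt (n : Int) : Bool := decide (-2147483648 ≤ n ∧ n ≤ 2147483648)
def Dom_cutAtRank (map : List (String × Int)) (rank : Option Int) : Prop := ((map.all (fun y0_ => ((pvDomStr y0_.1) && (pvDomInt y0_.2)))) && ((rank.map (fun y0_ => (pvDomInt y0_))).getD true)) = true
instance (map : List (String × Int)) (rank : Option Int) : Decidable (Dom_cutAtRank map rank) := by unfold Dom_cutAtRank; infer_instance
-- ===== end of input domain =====

-- B replaces A's in-place counter-and-pop loop by one filtered dict comprehension (idiomatic);
-- equivalence is about the RETURN value only: A mutates its dict argument in place, B builds a fresh dict.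

-- ===== PORT A =====
-- A iterates over the snapshot of the dict's keys with a counter, popping entries
-- whose position is ≥ rank or whose value is 0, and returns the mutated dict.
def cutAtRank (map : List (String × Int)) (rank : Option Int) : List (String × Int) :=
  let d := PySem.Dict.ofList map           -- the dict the Python function receives
  let r : Int := match rank with
    | none => (d.keys.length : Int)        -- rank = len(map.keys())
    | some v => v
  -- count = 0; for k in keys: if count >= rank or map[k] == 0: map.pop(k); count += 1
  let st := d.keys.foldl
    (fun (p : PySem.Dict String Int × Int) k =>
      ((if p.2 ≥ r ∨ p.1.get? k = some 0 then p.1.erase k else p.1), p.2 + 1))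
    (d, 0)
  st.1.items

-- ===== PORT B =====
-- {k: v for i, (k, v) in enumerate(map.items()) if i < rank and v != 0}
def cutAtRank_alt (map : List (String × Int)) (rank : Option Int) : List (String × Int) :=
  let d := PySem.Dict.ofList map
  let r : Int := match rank with
    | none => (d.size : Int)               -- rank = len(map)
    | some v => v
  ((PySem.List.enumerate d.items 0).filter
      (fun p => decide (p.1 < r) && decide (p.2.2 ≠ 0))).map (·.2)

-- ===== PRECONDITION & SPEC =====
def Spec_cutAtRank (map : List (String × Int)) (rank : Option Int) (out : List (String × Int)) : Prop := out = cutAtRank_alt map rank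
instance (map : List (String × Int)) (rank : Option Int) (out : List (String × Int)) : Decidable (Spec_cutAtRank map rank out) := by unfold Spec_cutAtRank; infer_instance

-- ===== CLAIM (what is proved, stated in full; the proofs are below) =====
def Claim_equal_cutAtRank : Prop := ∀ (map : List (String × Int)) (rank : Option Int), Dom_cutAtRank map rank → Spec_cutAtRank map rank (cutAtRank map rank)

-- ===== LEMMAS AND PROOFS =====

-- A's loop over the key snapshot, generalized: `pre` is the already-kept prefix,
-- `suf` the not-yet-visited items, `i` the counter; the dict state is `pre ++ suf`.
theorem cutAtRank_loopA (r : Int) :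
    ∀ (suf pre : List (String × Int)) (i : Int),
    ((pre ++ suf).map Prod.fst).Nodup →
    ((suf.map Prod.fst).foldl
      (fun (p : PySem.Dict String Int × Int) k =>
        ((if p.2 ≥ r ∨ p.1.get? k = some 0 then p.1.erase k else p.1), p.2 + 1))
      (PySem.Dict.mk (pre ++ suf), i)).1.items
    = pre ++ ((PySem.List.enumerate suf i).filter
        (fun p => decide (p.1 < r) && decide (p.2.2 ≠ 0))).map (·.2) := by
  intro suf
  induction suf with
  | nil => intro pre i _; simp [PySem.List.enumerate_nil]
  | cons hd tl ih =>
    intro pre i hnd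
    obtain ⟨k, v⟩ := hd
    have hnd' : (pre.map Prod.fst ++ k :: tl.map Prod.fst).Nodup := by simpa using hnd
    obtain ⟨hp1, hp2, hp3⟩ := List.nodup_append.mp hnd'
    have hkpre : ∀ p ∈ pre, ¬ p.1 = k := by
      intro p hp h
      exact hp3 p.1 (List.mem_map_of_mem hp) k (by simp) h
    have hktl : ∀ p ∈ tl, ¬ p.1 = k := by
      intro p hp h
      exact (List.nodup_cons.mp hp2).1 (h ▸ List.mem_map_of_mem hp)
    have hndrest : ((pre ++ tl).map Prod.fst).Nodup := by
      simp only [List.map_append]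
      exact List.nodup_append.mpr ⟨hp1, (List.nodup_cons.mp hp2).2,
        fun a ha b hb => hp3 a ha b (List.mem_cons_of_mem _ hb)⟩
    have hget : (PySem.Dict.mk (pre ++ (k, v) :: tl)).get? k = some v := by
      apply PySem.Dict.get?_of_mem_items
      · simp
      · simpa [PySem.Dict.keys] using hnd'
    have herase : (PySem.Dict.mk (pre ++ (k, v) :: tl)).erase k = PySem.Dict.mk (pre ++ tl) := by
      simp only [PySem.Dict.erase]
      congr 1
      simp only [List.filter_append, List.filter_cons]
      have h1 : pre.filter (fun p => !p.1 == k) = pre :=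
        List.filter_eq_self.mpr (fun p hp => by simp [hkpre p hp])
      have h2 : tl.filter (fun p => !p.1 == k) = tl :=
        List.filter_eq_self.mpr (fun p hp => by simp [hktl p hp])
      simp [h1, h2]
    rw [List.map_cons, List.foldl_cons, PySem.List.enumerate_cons, List.filter_cons, hget]
    by_cases hc : i ≥ r ∨ v = 0
    · have hcond : (i ≥ r ∨ some v = some (0 : Int)) := by
        rcases hc with h | h
        · exact Or.inl h
        · exact Or.inr (by simp [h])
      rw [if_pos hcond, herase]
      have hfilt : (decide (i < r) && decide (¬ v = 0)) = false := by
        rcases hc with h | h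
        · simp [not_lt.mpr h]
        · simp [h]
      rw [hfilt]
      simp only [if_neg Bool.false_ne_true]
      exact ih pre (i + 1) hndrest
    · rw [not_or] at hc
      have hlt : i < r := lt_of_not_ge hc.1
      have hcond : ¬ (i ≥ r ∨ some v = some (0 : Int)) := by
        rintro (h | h)
        · exact hc.1 h
        · exact hc.2 (by simpa using h)
      rw [if_neg hcond]
      have hfilt : (decide (i < r) && decide (¬ v = 0)) = true := by simp [hlt, hc.2]
      rw [hfilt]
      simp only [if_pos]
      have hre : pre ++ (k, v) :: tl = (pre ++ [(k, v)]) ++ tl := by simp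
      rw [hre, ih (pre ++ [(k, v)]) (i + 1) (by rw [← hre]; exact hnd)]
      simp

-- ===== VERDICT (by name: the statement is the Claim_ definition above) =====
theorem cutAtRank_spec : Claim_equal_cutAtRank := by
  intro map rank _
  unfold Spec_cutAtRank cutAtRank cutAtRank_alt
  have hnd : (((PySem.Dict.ofList map).items.map Prod.fst)).Nodup := by
    simpa [PySem.Dict.keys] using PySem.Dict.nodup_keys_ofList (κ := String) (ν := Int) map
  cases rank with
  | none =>
      simpa [PySem.Dict.keys, PySem.Dict.size, List.length_map] using
        cutAtRank_loopA ((PySem.Dict.ofList map).items.length : Int)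
          (PySem.Dict.ofList map).items [] 0 (by simpa using hnd)
  | some v =>
      simpa [PySem.Dict.keys, PySem.Dict.size] using cutAtRank_loopA v (PySem.Dict.ofList map).items [] 0 (by simpa using hnd)
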